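-- pv_equiv track=rewrite | github.com/definitelynotrussellkirk-bit/binarySKILL | generators/words.py | validate_binary_string
-- ===== SOURCE A (Python) =====
-- def validate_binary_string(s: str, n: int, k: int) -> bool:
--     """
--     Validate that a string is a binary string of length n with k ones.
--
--     Args:
--         s: String to validate
--         n: Expected length
--         k: Expected number of ones
--
--     Returns:
--         True if valid
--
--     Examples:
--         >>> validate_binary_string('10110', 5, 3)
--         True
--         >>> validate_binary_string('10110', 5, 2)
--         False
--         >>> validate_binary_string('102', 3, 2)
--         False
--     """
--     if len(s) != n:
--         return False
--     if not all(c in '01' for c in s):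
--         return False
--     if s.count('1') != k:
--         return False
--     return True
-- ===== SOURCE B (Python) =====
-- def validate_binary_string(s: str, n: int, k: int) -> bool:
--     # single left-to-right pass: spend the length budget n and ones budget k
--     # character by character; abort on any foreign character; valid iff both
--     # budgets land exactly on zero.
--     rem_n, rem_k = n, k
--     for c in s:
--         rem_n -= 1
--         if c == '1':
--             rem_k -= 1
--         elif c != '0':
--             return False
--     return rem_n == 0 and rem_k == 0
-- ===== Notes on version B (the rewrite author's own statement) =====
-- stated objective: alternative
-- what changed: Replaces A's three staged whole-string passes (len, all(c in '01'), count('1')) by a single left-to-right pass that decrements a length budget and a ones budget per character, aborting early on a foreign character and accepting iff both budgets end exactly at zero.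
import Mathlib
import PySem

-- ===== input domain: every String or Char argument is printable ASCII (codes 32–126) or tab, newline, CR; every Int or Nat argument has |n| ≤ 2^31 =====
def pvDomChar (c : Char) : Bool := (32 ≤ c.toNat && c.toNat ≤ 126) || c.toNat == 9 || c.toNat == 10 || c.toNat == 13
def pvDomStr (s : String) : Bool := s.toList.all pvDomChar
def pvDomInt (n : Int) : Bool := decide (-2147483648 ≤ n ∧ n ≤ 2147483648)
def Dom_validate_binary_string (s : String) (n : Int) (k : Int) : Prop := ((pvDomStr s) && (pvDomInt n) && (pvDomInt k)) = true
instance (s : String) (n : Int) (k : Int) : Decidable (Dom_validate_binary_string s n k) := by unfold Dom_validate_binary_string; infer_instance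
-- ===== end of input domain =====

-- ===== PORT A =====
-- B replaces A's three staged passes by one pass spending a length and a ones budget (alternative).
def validate_binary_string (s : String) (n : Int) (k : Int) : Bool :=
  if (PySem.Str.len s : Int) ≠ n then false
  else if ¬ (s.toList.all (fun c => PySem.Chars.isIn [c] ['0', '1'])) then false
  else if (PySem.Str.count s "1" : Int) ≠ k then false
  else true

-- ===== PORT B =====
-- 'for c in s: rem_n -= 1; if c == '1': rem_k -= 1; elif c != '0': return False'
def vbsGo : List Char → Int → Int → Bool
  | [], remN, remK => remN == 0 && remK == 0
  | c :: t, remN, remK =>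
      if c == '1' then vbsGo t (remN - 1) (remK - 1)
      else if c == '0' then vbsGo t (remN - 1) remK
      else false

def validate_binary_string_alt (s : String) (n : Int) (k : Int) : Bool :=
  vbsGo s.toList n k

-- ===== PRECONDITION & SPEC =====
def Spec_validate_binary_string (s : String) (n : Int) (k : Int) (out : Bool) : Prop := out = validate_binary_string_alt s n k
instance (s : String) (n : Int) (k : Int) (out : Bool) : Decidable (Spec_validate_binary_string s n k out) := by unfold Spec_validate_binary_string; infer_instance

-- ===== CLAIM =====
def Claim_equal_validate_binary_string : Prop := ∀ (s : String) (n : Int) (k : Int), Dom_validate_binary_string s n k → Spec_validate_binary_string s n k (validate_binary_string s n k)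

-- ===== LEMMAS AND PROOFS =====

-- Characterisation of the single-pass loop: both budgets land on zero exactly
-- when the length and the count of '1' match and every character is binary.
theorem vbsGo_eq (l : List Char) (n k : Int) :
    vbsGo l n k =
      (decide ((l.length : Int) = n) && l.all (fun c => c == '0' || c == '1')
        && decide ((l.count '1' : Int) = k)) := by
  induction l generalizing n k with
  | nil =>
      have beqd : ∀ m : Int, (m == 0) = decide (0 = m) := by
        intro m
        rcases eq_or_ne m 0 with h | h
        · subst h; simp
        · have h2 : decide ((0:Int) = m) = false := by simp [Ne.symm h]
          simp [h, h2]
      simp [vbsGo, beqd]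
  | cons c t ih =>
      by_cases h1 : c = '1'
      · subst h1
        simp only [vbsGo, ih]
        by_cases hn : ((t.length : Int) = n - 1) <;> by_cases hk : ((t.count '1' : Int) = k - 1) <;>
          simp_all <;> omega
      · by_cases h0 : c = '0'
        · subst h0
          have : ('0' == '1') = false := by decide
          simp only [vbsGo, this, if_neg, Bool.false_eq_true, not_false_iff, ih]
          by_cases hn : ((t.length : Int) = n - 1) <;>
            simp_all <;> omega
        · have hc1 : (c == '1') = false := by simp [h1]
          have hc0 : (c == '0') = false := by simp [h0]
          simp [vbsGo, hc1, hc0]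

-- Python s.count(v) for a single-character needle is List.count on the characters.
theorem chars_count_go_singleton (v : Char) (l : List Char) (acc : Nat) :
    PySem.Chars.count.go [v] l.length l acc = acc + l.count v := by
  induction l generalizing acc with
  | nil => simp [PySem.Chars.count.go]
  | cons c t ih =>
      simp only [List.length_cons, PySem.Chars.count.go]
      by_cases h : v = c
      · subst h
        simp [List.isPrefixOf, ih]
        omega
      · have h' : ([v].isPrefixOf (c :: t)) = false := by
          simp [List.isPrefixOf]
          intro e; exact absurd e h
        have h'' : (c == v) = false := by
          simp; intro e; exact h e.symm
        simp [h', h'', List.count_cons, ih]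

theorem chars_count_singleton (v : Char) (l : List Char) :
    PySem.Chars.count l [v] = l.count v := by
  simp [PySem.Chars.count, chars_count_go_singleton]

-- A's membership test 'c in "01"' agrees with the plain disjunction used in vbsGo_eq.
theorem isIn01_eq (c : Char) :
    PySem.Chars.isIn [c] ['0', '1'] = (c == '0' || c == '1') := by
  by_cases h0 : c = '0'
  · subst h0; decide
  · by_cases h1 : c = '1'
    · subst h1; decide
    · have : PySem.Chars.isIn [c] ['0', '1'] = false := by
        rw [PySem.Chars.isIn_eq_false_iff, List.singleton_infix_iff]
        simp [h0, h1]
      simp [this, h0, h1]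

theorem validate_binary_string_equiv (s : String) (n : Int) (k : Int) :
    validate_binary_string s n k = validate_binary_string_alt s n k := by
  unfold validate_binary_string validate_binary_string_alt
  rw [vbsGo_eq]
  simp only [PySem.Str.count_eq, PySem.Str.len_eq]
  have hmem : (s.toList.all (fun c => PySem.Chars.isIn [c] ['0', '1']))
      = s.toList.all (fun c => c == '0' || c == '1') := by
    simp [isIn01_eq]
  by_cases hn : ((s.toList.length : Int) = n)
  · by_cases hall : (s.toList.all (fun c => c == '0' || c == '1') = true)
    · by_cases hk : ((s.toList.count '1' : Int) = k) <;>
        simp_all [chars_count_singleton]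
    · simp_all
  · simp_all

-- ===== VERDICT =====
theorem validate_binary_string_spec : Claim_equal_validate_binary_string := by
  intro s n k _
  unfold Spec_validate_binary_string
  exact validate_binary_string_equiv s n k
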